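-- pv_equiv track=rewrite | github.com/alexandraback/datacollection | solutions_5751500831719424_0/Python/aPoCaLYpSe/therepeater.py | str2num
-- ===== SOURCE A (Python) =====
-- def str2num(str, template):
-- 	nums = []
-- 	sidx = 0
-- 	for char in template:
-- 		count = 0
-- 		while (sidx < len(str)):
-- 			if (str[sidx]==char):
-- 				count += 1
-- 				sidx += 1
-- 			else:
-- 				break
-- 		if (count == 0):
-- 			return None
-- 		nums.append(count)
-- 	if (sidx != len(str)):
-- 		return None
-- 	return nums
-- ===== SOURCE B (Python) =====
-- from itertools import groupby
--
-- def str2num(str, template):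
--     runs = [(c, sum(1 for _ in g)) for c, g in groupby(str)]
--     if [c for c, _ in runs] != list(template):
--         return None
--     return [n for _, n in runs]
-- ===== Notes on version B (the rewrite author's own statement) =====
-- stated objective: simpler
-- what changed: B builds the full run-length table of the string once with itertools.groupby and then compares the run characters to the template in one equality check, instead of A's interleaved index walk that consumes a run per template character.
import Mathlib
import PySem

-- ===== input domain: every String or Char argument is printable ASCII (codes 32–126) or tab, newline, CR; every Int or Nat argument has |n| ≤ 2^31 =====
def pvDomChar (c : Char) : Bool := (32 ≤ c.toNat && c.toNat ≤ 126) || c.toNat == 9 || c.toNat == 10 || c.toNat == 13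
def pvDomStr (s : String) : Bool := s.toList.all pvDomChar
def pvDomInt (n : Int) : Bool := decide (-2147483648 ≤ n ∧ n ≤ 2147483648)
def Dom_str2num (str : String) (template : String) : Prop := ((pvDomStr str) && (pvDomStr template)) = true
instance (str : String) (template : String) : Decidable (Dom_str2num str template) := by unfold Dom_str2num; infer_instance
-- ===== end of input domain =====

-- B replaces A's interleaved index walk (one counted run consumed per template char)
-- by building the run-length table of the string once, then comparing the run
-- characters to the template in a single equality check; objective: simpler.

-- ===== PORT A =====
-- A's inner `while` loop: counts consecutive chars equal to c starting at index sidx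
def pvRunCountA (s : List Char) (c : Char) (sidx : Nat) : Nat :=
  if h : sidx < s.length then
    if s[sidx] = c then pvRunCountA s c (sidx + 1) + 1 else 0
  else 0
termination_by s.length - sidx

-- A's `for char in template` loop with state (sidx, nums)
def pvLoopA (s : List Char) (tmpl : List Char) (sidx : Nat) (nums : List Int) : Option (List Int) :=
  match tmpl with
  | [] => if sidx ≠ s.length then none else some nums
  | c :: rest =>
      let count := pvRunCountA s c sidx
      if count = 0 then none
      else pvLoopA s rest (sidx + count) (nums ++ [(count : Int)])

def str2num (str : String) (template : String) : Option (List Int) :=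
  pvLoopA str.toList template.toList 0 []

-- ===== PORT B =====
-- itertools.groupby(str): the run-length table of the string
def pvRle (l : List Char) : List (Char × Nat) :=
  match l with
  | [] => []
  | c :: cs =>
      match pvRle cs with
      | [] => [(c, 1)]
      | (d, n) :: rest => if c = d then (c, n + 1) :: rest else (c, 1) :: (d, n) :: rest

def str2num_alt (str : String) (template : String) : Option (List Int) :=
  let runs := pvRle str.toList
  if runs.map Prod.fst ≠ template.toList then none
  else some (runs.map (fun p => (p.2 : Int)))

-- ===== PRECONDITION & SPEC =====
def Spec_str2num (str : String) (template : String) (out : Option (List Int)) : Prop := out = str2num_alt str template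
instance (str : String) (template : String) (out : Option (List Int)) : Decidable (Spec_str2num str template out) := by unfold Spec_str2num; infer_instance

-- ===== CLAIM (what is proved, stated in full; the proofs are below) =====
def Claim_equal_str2num : Prop := ∀ (str : String) (template : String), Dom_str2num str template → Spec_str2num str template (str2num str template)

-- ===== LEMMAS AND PROOFS =====

-- number of leading characters of l equal to c
def pvLead (c : Char) (l : List Char) : Nat :=
  match l with
  | [] => 0
  | d :: t => if d = c then pvLead c t + 1 else 0

theorem pvLead_le (c : Char) (l : List Char) : pvLead c l ≤ l.length := by
  induction l with
  | nil => simp [pvLead]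
  | cons d t ih => simp only [pvLead, List.length_cons]; split <;> omega

theorem pvLead_pos (c : Char) (l : List Char) (h : 0 < pvLead c l) :
    ∃ t, l = c :: t := by
  cases l with
  | nil => simp [pvLead] at h
  | cons d t =>
      simp only [pvLead] at h
      by_cases hd : d = c
      · exact ⟨t, by rw [hd]⟩
      · simp [hd] at h

theorem pvRunCountA_eq_lead (s : List Char) (c : Char) (sidx : Nat) :
    pvRunCountA s c sidx = pvLead c (s.drop sidx) := by
  by_cases h : sidx < s.length
  · rw [pvRunCountA, dif_pos h]
    rw [List.drop_eq_getElem_cons h]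
    simp only [pvLead]
    by_cases hc : s[sidx] = c
    · rw [if_pos hc, if_pos hc, pvRunCountA_eq_lead s c (sidx + 1)]
    · rw [if_neg hc, if_neg hc]
  · rw [pvRunCountA, dif_neg h, List.drop_eq_nil_of_le (by omega)]
    simp [pvLead]
termination_by s.length - sidx

theorem pvRle_nil_iff (l : List Char) : pvRle l = [] ↔ l = [] := by
  cases l with
  | nil => simp [pvRle]
  | cons c cs =>
      simp only [pvRle]
      constructor
      · intro h
        cases hr : pvRle cs with
        | nil => simp [hr] at h
        | cons p rest =>
            rw [hr] at h
            obtain ⟨d, n⟩ := p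
            by_cases hc : c = d <;> simp [hc] at h
      · intro h; exact absurd h (by simp)

theorem pvRle_head_fst (c : Char) (cs : List Char) :
    ((pvRle (c :: cs)).head?).map Prod.fst = some c := by
  simp only [pvRle]
  cases hr : pvRle cs with
  | nil => simp
  | cons p rest =>
      obtain ⟨d, n⟩ := p
      by_cases hc : c = d <;> simp [hc]

-- peeling the leading run off the run-length table
theorem pvRle_peel (c : Char) (t : List Char) :
    pvRle (c :: t) = (c, pvLead c (c :: t)) :: pvRle ((c :: t).drop (pvLead c (c :: t))) := by
  induction t generalizing c with
  | nil => simp [pvRle, pvLead]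
  | cons d t' ih =>
      by_cases hd : d = c
      · subst hd
        have hlead : pvLead d (d :: d :: t') = pvLead d (d :: t') + 1 := by simp [pvLead]
        have step : pvRle (d :: d :: t') =
            (match pvRle (d :: t') with
             | [] => [(d, 1)]
             | (e, n) :: rest => if d = e then (d, n + 1) :: rest else (d, 1) :: (e, n) :: rest) := rfl
        rw [step, ih d, hlead]
        simp [List.drop_succ_cons]
      · have hlead : pvLead c (c :: d :: t') = 1 := by simp [pvLead, hd]
        rw [hlead]
        simp only [List.drop_succ_cons, List.drop_zero]
        show (match pvRle (d :: t') with
              | [] => [(c, 1)]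
              | (e, n) :: rest => if c = e then (c, n + 1) :: rest else (c, 1) :: (e, n) :: rest)
            = (c, 1) :: pvRle (d :: t')
        cases hr : pvRle (d :: t') with
        | nil => exact absurd ((pvRle_nil_iff _).mp hr) (by simp)
        | cons p rest =>
            obtain ⟨e, n⟩ := p
            have he : e = d := by
              have h2 := pvRle_head_fst d t'
              rw [hr] at h2; simpa using h2
            have hce : ¬ c = e := by rw [he]; intro h; exact hd h.symm
            simp [hce]

-- main loop invariant: A's loop computes B's run-table comparison on the remaining suffix
theorem pvLoopA_eq (tmpl : List Char) (s : List Char) (sidx : Nat) (acc : List Int)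
    (hle : sidx ≤ s.length) :
    pvLoopA s tmpl sidx acc =
      (if (pvRle (s.drop sidx)).map Prod.fst ≠ tmpl then none
       else some (acc ++ (pvRle (s.drop sidx)).map (fun p => (p.2 : Int)))) := by
  induction tmpl generalizing sidx acc with
  | nil =>
      simp only [pvLoopA]
      by_cases h : sidx = s.length
      · have hd : s.drop sidx = [] := List.drop_eq_nil_of_le (by omega)
        simp [h, pvRle]
      · have hdne : s.drop sidx ≠ [] := by
          intro hc
          have := List.length_drop (l := s) (i := sidx)
          rw [hc] at this; simp at this; omega
        have : (pvRle (s.drop sidx)).map Prod.fst ≠ [] := by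
          simp only [ne_eq, List.map_eq_nil_iff]
          rw [pvRle_nil_iff]; exact hdne
        simp [h, this]
  | cons c rest ih =>
      simp only [pvLoopA]
      rw [pvRunCountA_eq_lead]
      set l := s.drop sidx with hl
      by_cases h0 : pvLead c l = 0
      · rw [if_pos h0]
        cases hcase : l with
        | nil => simp [pvRle]
        | cons d t =>
            have hd : d ≠ c := by
              intro hdc; subst hdc; rw [hcase] at h0; simp [pvLead] at h0
            have hhead : ((pvRle (d :: t)).map Prod.fst).head? = some d := by
              have h2 := pvRle_head_fst d t
              cases hr : pvRle (d :: t) with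
              | nil => rw [hr] at h2; simp at h2
              | cons p r => rw [hr] at h2; simp at h2; simp [h2]
            have hne : (pvRle (d :: t)).map Prod.fst ≠ c :: rest := by
              intro hc; rw [hc] at hhead; simp at hhead; exact hd hhead.symm
            simp [hne]
      · rw [if_neg h0]
        obtain ⟨t, ht⟩ := pvLead_pos c l (Nat.pos_of_ne_zero h0)
        set k := pvLead c l with hk
        have hpeel : pvRle l = (c, k) :: pvRle (l.drop k) := by
          rw [ht]; rw [ht] at hk; rw [hk]; exact pvRle_peel c t
        have hkle : k ≤ l.length := pvLead_le c l
        have hlen : l.length = s.length - sidx := by rw [hl, List.length_drop]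
        have hdd : s.drop (sidx + k) = l.drop k := by
          rw [hl, List.drop_drop]
        rw [ih (sidx + k) (acc ++ [(k : Int)]) (by omega), hdd, hpeel]
        by_cases hrest : (pvRle (l.drop k)).map Prod.fst = rest
        · simp [hrest]
        · simp [hrest]

-- ===== VERDICT (by name: the statement is the Claim_ definition above) =====
theorem str2num_spec : Claim_equal_str2num := by
  intro str template _
  unfold Spec_str2num str2num str2num_alt
  rw [pvLoopA_eq _ _ 0 [] (Nat.zero_le _)]
  simp
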